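-- pv_equiv track=rewrite | github.com/vfarcy/Schulze-vote-counting-system | schulze.py | calculate_strongest_paths
-- ===== SOURCE A (Python) =====
-- def build_matrix(size):
--     x = [[0 for j in range(size)] for i in range(size)]
--     for i in range(size):
--         x[i][i] = None
--     return x
--
-- def calculate_strongest_paths(count):
--     paths = build_matrix(len(count))
--
--     for i in range(len(count)):
--         for j in range(len(count)):
--             if i == j: continue
--             if count[i][j] > count[j][i]:
--                 paths[i][j] = count[i][j]
--
--     for i in range(len(count)):
--         for j in range(len(count)):
--             if i == j: continue
--             for k in range(len(count)):
--                 if i != k and j != k: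
--                     paths[j][k] = max(paths[j][k], min(paths[j][i], paths[i][k]))
--
--     return paths
-- ===== SOURCE B (Python) =====
-- def calculate_strongest_paths(count):
--     # Bellman-Ford-style fixpoint: repeated (max,min) matrix self-relaxation instead of Floyd-Warshall
--     n = len(count)
--     d = [[count[a][b] if count[a][b] > count[b][a] else 0 for b in range(n)]
--          for a in range(n)]
--     for _ in range(n):
--         nd = [[_relax_entry(d, a, b, n) for b in range(n)] for a in range(n)]
--         if nd == d:
--             break
--         d = nd
--     return [[None if a == b else d[a][b] for b in range(n)] for a in range(n)]
--
-- def _relax_entry(d, a, b, n):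
--     best = d[a][b]
--     for t in range(n):
--         best = max(best, min(d[a][t], d[t][b]))
--     return best
-- ===== Notes on version B (the rewrite author's own statement) =====
-- stated objective: alternative
-- what changed: Replaced the in-place Floyd-Warshall triple loop over intermediates with a Bellman-Ford-style scheme: repeatedly recompute the whole matrix by a (max,min) self-relaxation step (d[a][b] := max(d[a][b], max_t min(d[a][t], d[t][b]))) until it reaches a fixpoint (at most n rounds), masking the diagonal with None only at the end. Pre_ excludes ragged inputs (a row shorter than len(count)): there A usually raises IndexError, and on the few ragged inputs where A still returns (A never reads diagonal cells) B raises IndexError instead.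
-- outside the precondition, e.g. on calculate_strongest_paths([[]]): A returns [[None]], B raises IndexError; on calculate_strongest_paths([[0, 1], [5]]): A returns [[None, 0], [5, None]], B raises IndexError
import Mathlib
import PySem

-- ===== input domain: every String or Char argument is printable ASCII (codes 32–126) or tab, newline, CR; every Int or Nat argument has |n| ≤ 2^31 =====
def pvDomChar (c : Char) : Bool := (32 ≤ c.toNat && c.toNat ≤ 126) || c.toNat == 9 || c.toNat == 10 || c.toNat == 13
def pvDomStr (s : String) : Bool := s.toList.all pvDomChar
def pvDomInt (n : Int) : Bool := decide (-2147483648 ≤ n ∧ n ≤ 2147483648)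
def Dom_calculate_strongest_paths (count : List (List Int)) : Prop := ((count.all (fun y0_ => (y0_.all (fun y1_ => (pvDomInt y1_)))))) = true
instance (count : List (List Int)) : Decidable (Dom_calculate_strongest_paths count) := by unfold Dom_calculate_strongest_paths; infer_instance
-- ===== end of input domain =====

-- B replaces A's in-place Floyd-Warshall triple loop by repeated whole-matrix (max,min) self-relaxation iterated to a fixpoint (objective: alternative; no speed claim).


-- ===== PORT A =====
-- Shared index read: Python count[i][j]; in range whenever Pre_ holds, so getD's default is never used there.
-- pmax/pmin: Python max/min on matrix cells; under Pre_ both operands are always ints (None would raise TypeError -> totalized to none).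

def cget (count : List (List Int)) (i j : Nat) : Int := (count.getD i []).getD j 0

def pmax (x y : Option Int) : Option Int :=
  match x, y with
  | some a, some b => some (max a b)
  | _, _ => none

def pmin (x y : Option Int) : Option Int :=
  match x, y with
  | some a, some b => some (min a b)
  | _, _ => none

def aget (p : List (List (Option Int))) (i j : Nat) : Option Int := (p.getD i []).getD j none

def aset (p : List (List (Option Int))) (i j : Nat) (v : Option Int) : List (List (Option Int)) :=
  p.set i ((p.getD i []).set j v)

def build_matrix (size : Nat) : List (List (Option Int)) :=
  let x := (List.range size).map (fun _ => (List.range size).map (fun _ => some (0 : Int)))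
  (List.range size).foldl (fun x i => aset x i i none) x

def aBody1 (c : List (List Int)) (i : Nat) (p : List (List (Option Int))) (j : Nat) : List (List (Option Int)) :=
  if i = j then p
  else if cget c i j > cget c j i then aset p i j (some (cget c i j)) else p

def aBody2k (i j : Nat) (p : List (List (Option Int))) (k : Nat) : List (List (Option Int)) :=
  if i ≠ k ∧ j ≠ k then aset p j k (pmax (aget p j k) (pmin (aget p j i) (aget p i k))) else p

def aBody2j (n i : Nat) (p : List (List (Option Int))) (j : Nat) : List (List (Option Int)) :=
  if i = j then p else (List.range n).foldl (aBody2k i j) p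

def calculate_strongest_paths (count : List (List Int)) : List (List (Option Int)) :=
  let n := count.length
  let paths := build_matrix n
  let paths := (List.range n).foldl (fun p i => (List.range n).foldl (aBody1 count i) p) paths
  (List.range n).foldl (fun p i => (List.range n).foldl (aBody2j n i) p) paths

def bRelaxEntry (d : List (List Int)) (a b n : Nat) : Int :=
  (List.range n).foldl (fun best t => max best (min (cget d a t) (cget d t b))) (cget d a b)

def bRelax (d : List (List Int)) (n : Nat) : List (List Int) :=
  (List.range n).map (fun a => (List.range n).map (fun b => bRelaxEntry d a b n))

def bLoop (n : Nat) : Nat → List (List Int) → List (List Int)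
  | 0, d => d
  | m + 1, d =>
    let nd := bRelax d n
    if nd = d then d else bLoop n m nd

def calculate_strongest_paths_alt (count : List (List Int)) : List (List (Option Int)) :=
  let n := count.length
  let d0 := (List.range n).map (fun a => (List.range n).map (fun b =>
      if cget count a b > cget count b a then cget count a b else 0))
  let d := bLoop n n d0
  (List.range n).map (fun a => (List.range n).map (fun b =>
      if a = b then none else some (cget d a b)))


-- ===== PRECONDITION & SPEC =====
-- Pre_ excludes ragged inputs (a row shorter than len(count)): there A usually raises IndexError, and on the few
-- ragged inputs where A still returns (A never reads diagonal cells) B raises IndexError instead.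
def Pre_calculate_strongest_paths (count : List (List Int)) : Prop :=
  ∀ row ∈ count, count.length ≤ row.length
instance (count : List (List Int)) : Decidable (Pre_calculate_strongest_paths count) := by
  unfold Pre_calculate_strongest_paths; infer_instance

def pvWitness_calculate_strongest_paths : List (List Int) := [[0, 2], [1, 0]]

def Spec_calculate_strongest_paths (count : List (List Int)) (out : List (List (Option Int))) : Prop := out = calculate_strongest_paths_alt count
instance (count : List (List Int)) (out : List (List (Option Int))) : Decidable (Spec_calculate_strongest_paths count out) := by unfold Spec_calculate_strongest_paths; infer_instance

-- ===== CLAIM (what is proved, stated in full; the proofs are below) =====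
def Claim_equal_calculate_strongest_paths : Prop := ∀ (count : List (List Int)), Dom_calculate_strongest_paths count → Pre_calculate_strongest_paths count → Spec_calculate_strongest_paths count (calculate_strongest_paths count)

-- ===== LEMMAS AND PROOFS =====

-- Functional models of the two computations (indices below n are the only ones that matter).
def pvW (c : List (List Int)) (a b : Nat) : Int :=
  if cget c a b > cget c b a then cget c a b else 0

-- unguarded Floyd-Warshall recursion
def pvFW (c : List (List Int)) : Nat → Nat → Nat → Int
  | 0 => pvW c
  | m + 1 => fun a b => max (pvFW c m a b) (min (pvFW c m a m) (pvFW c m m b))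

-- guarded simultaneous step (what one outer iteration of A does to the off-diagonal values)
def pvG (i : Nat) (g : Nat → Nat → Int) (j k : Nat) : Int :=
  if j ≠ i ∧ k ≠ i ∧ j ≠ k then max (g j k) (min (g j i) (g i k)) else g j k

def pvGFW (c : List (List Int)) : Nat → Nat → Nat → Int
  | 0 => pvW c
  | m + 1 => pvG m (pvGFW c m)

def pvShape (n : Nat) (p : List (List (Option Int))) : Prop :=
  p.length = n ∧ ∀ r ∈ p, r.length = n

-- A-side matrix bookkeeping --------------------------------------------------

lemma aset_shape {n : Nat} {p : List (List (Option Int))} (hS : pvShape n p)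
    (i j : Nat) (v : Option Int) (hi : i < n) : pvShape n (aset p i j v) := by
  obtain ⟨hlen, hrow⟩ := hS
  refine ⟨by simp [aset, hlen], ?_⟩
  intro r hr
  rcases List.mem_or_eq_of_mem_set hr with h | h
  · exact hrow _ h
  · subst h
    have hmem : p.getD i [] ∈ p := by
      rw [List.getD_eq_getElem _ _ (by omega)]
      exact List.getElem_mem _
    rw [List.length_set]
    exact hrow _ hmem

lemma aget_aset {n : Nat} {p : List (List (Option Int))} (hS : pvShape n p)
    {i j : Nat} (hi : i < n) (hj : j < n) (v : Option Int) (x y : Nat) :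
    aget (aset p i j v) x y = if x = i ∧ y = j then v else aget p x y := by
  obtain ⟨hlen, hrow⟩ := hS
  have hip : i < p.length := by omega
  have hmem : p.getD i [] ∈ p := by
    rw [List.getD_eq_getElem _ _ hip]
    exact List.getElem_mem _
  have hrl : (p.getD i []).length = n := hrow _ hmem
  by_cases hx : x = i
  · subst hx
    have h2 : (p.set x ((p.getD x []).set j v)).getD x [] = (p.getD x []).set j v := by
      rw [List.getD_eq_getElem?_getD, List.getElem?_set_self hip, Option.getD_some]
    have h1 : aget (aset p x j v) x y = ((p.getD x []).set j v).getD y none := by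
      unfold aget aset
      rw [h2]
    rw [h1]
    by_cases hy : y = j
    · subst hy
      rw [List.getD_eq_getElem?_getD, List.getElem?_set_self (by omega)]
      simp
    · rw [List.getD_eq_getElem?_getD, List.getElem?_set_ne (fun h => hy h.symm),
        ← List.getD_eq_getElem?_getD]
      simp [aget, hy]
  · have h1 : aget (aset p i j v) x y = aget p x y := by
      simp only [aget, aset, List.getD_eq_getElem?_getD,
        List.getElem?_set_ne (fun h => hx h.symm)]
    simp [h1, hx]

lemma eq_map_range {n : Nat} {p : List (List (Option Int))} (hS : pvShape n p)
    (f : Nat → Nat → Option Int) (h : ∀ a b, a < n → b < n → aget p a b = f a b) :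
    p = (List.range n).map (fun a => (List.range n).map (fun b => f a b)) := by
  obtain ⟨hlen, hrow⟩ := hS
  apply List.ext_getElem (by simp [hlen])
  intro a ha1 ha2
  have han : a < n := by omega
  rw [List.getElem_map, List.getElem_range]
  have hrl : p[a].length = n := hrow _ (List.getElem_mem _)
  apply List.ext_getElem (by simp [hrl])
  intro b hb1 hb2
  rw [List.getElem_map, List.getElem_range]
  have hbn : b < n := by omega
  have := h a b han hbn
  rw [← this]
  simp only [aget, List.getD_eq_getElem?_getD]
  rw [List.getElem?_eq_getElem ha1]
  simp only [Option.getD_some]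
  rw [List.getElem?_eq_getElem hb1]
  rfl

lemma build_matrix_spec (n : Nat) :
    pvShape n (build_matrix n) ∧
      ∀ a b, a < n → b < n →
        aget (build_matrix n) a b = if a = b then none else some 0 := by
  have hS0 : pvShape n ((List.range n).map (fun _ => (List.range n).map (fun _ => some (0 : Int)))) := by
    constructor
    · simp
    · intro r hr
      rcases List.mem_map.1 hr with ⟨a, _, rfl⟩
      simp
  have hv0 : ∀ a b, a < n → b < n →
      aget ((List.range n).map (fun _ => (List.range n).map (fun _ => some (0 : Int)))) a b = some 0 := by
    intro a b ha hb
    unfold aget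
    rw [PySem.List.getD_map_range _ _ _ _ ha, PySem.List.getD_map_range _ _ _ _ hb]
  have key : ∀ m, m ≤ n →
      pvShape n ((List.range m).foldl (fun x i => aset x i i none)
        ((List.range n).map (fun _ => (List.range n).map (fun _ => some (0 : Int))))) ∧
      ∀ a b, a < n → b < n →
        aget ((List.range m).foldl (fun x i => aset x i i none)
          ((List.range n).map (fun _ => (List.range n).map (fun _ => some (0 : Int))))) a b =
          if a = b ∧ a < m then none else some 0 := by
    intro m
    induction m with
    | zero =>
      intro _
      simp only [List.range_zero, List.foldl_nil]
      refine ⟨hS0, ?_⟩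
      intro a b ha hb
      rw [hv0 a b ha hb]
      simp
    | succ k ih =>
      intro hk
      obtain ⟨ihS, ihv⟩ := ih (by omega)
      rw [List.range_succ, List.foldl_append, List.foldl_cons, List.foldl_nil]
      refine ⟨aset_shape ihS k k none (by omega), ?_⟩
      intro a b ha hb
      rw [aget_aset ihS (by omega) (by omega) none a b]
      by_cases hak : a = k ∧ b = k
      · rw [if_pos hak]
        have : (a = b ∧ a < k + 1) := by omega
        rw [if_pos this]
      · rw [if_neg hak, ihv a b ha hb]
        split_ifs <;> first | rfl | omega
  obtain ⟨hS, hv⟩ := key n le_rfl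
  refine ⟨by simpa [build_matrix] using hS, ?_⟩
  intro a b ha hb
  have := hv a b ha hb
  simp only [build_matrix]
  rw [this]
  split_ifs <;> first | rfl | omega

-- Phase 1 of A: initialize off-diagonal entries to pvW.
lemma phase1_inner (c : List (List Int)) {n : Nat} (i : Nat) (hi : i < n)
    {p : List (List (Option Int))} (hS : pvShape n p)
    (hv : ∀ a b, a < n → b < n →
      aget p a b = if a = b then none else if a < i then some (pvW c a b) else some 0) :
    ∀ m, m ≤ n → pvShape n ((List.range m).foldl (aBody1 c i) p) ∧
      ∀ a b, a < n → b < n →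
        aget ((List.range m).foldl (aBody1 c i) p) a b =
          if a = i ∧ b < m ∧ a ≠ b then some (pvW c a b)
          else if a = b then none else if a < i then some (pvW c a b) else some 0 := by
  intro m
  induction m with
  | zero =>
    intro _
    simp only [List.range_zero, List.foldl_nil]
    refine ⟨hS, ?_⟩
    intro a b ha hb
    rw [hv a b ha hb]
    split_ifs <;> first | rfl | omega
  | succ k ihm =>
    intro hk
    obtain ⟨ihS, ihv⟩ := ihm (by omega)
    rw [List.range_succ, List.foldl_append, List.foldl_cons, List.foldl_nil]
    simp only [aBody1]
    by_cases hik : i = k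
    · rw [if_pos hik]
      refine ⟨ihS, ?_⟩
      intro a b ha hb
      rw [ihv a b ha hb]
      split_ifs <;> first | rfl | omega
    · rw [if_neg hik]
      by_cases hc : cget c i k > cget c k i
      · rw [if_pos hc]
        refine ⟨aset_shape ihS i k _ hi, ?_⟩
        intro a b ha hb
        rw [aget_aset ihS hi (by omega) _ a b]
        by_cases hab : a = i ∧ b = k
        · rw [if_pos hab]
          have hcond : a = i ∧ b < k + 1 ∧ a ≠ b := by omega
          rw [if_pos hcond]
          obtain ⟨rfl, rfl⟩ := hab
          simp [pvW, hc]
        · rw [if_neg hab, ihv a b ha hb]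
          split_ifs <;> first | rfl | omega
      · rw [if_neg hc]
        refine ⟨ihS, ?_⟩
        intro a b ha hb
        rw [ihv a b ha hb]
        by_cases hab : a = i ∧ b = k ∧ a ≠ b
        · have h1 : ¬ (a = i ∧ b < k ∧ a ≠ b) := by omega
          have h2 : (a = i ∧ b < k + 1 ∧ a ≠ b) := by omega
          rw [if_neg h1, if_pos h2]
          have hne : ¬ a = b := by omega
          rw [if_neg hne]
          have hlt : ¬ a < i := by omega
          rw [if_neg hlt]
          obtain ⟨rfl, rfl, _⟩ := hab
          simp [pvW, hc]
        · split_ifs <;> first | rfl | omega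

lemma phase1 (c : List (List Int)) {n : Nat} {p : List (List (Option Int))}
    (hS : pvShape n p)
    (hv : ∀ a b, a < n → b < n → aget p a b = if a = b then none else some 0) :
    ∀ m, m ≤ n →
      pvShape n ((List.range m).foldl (fun p i => (List.range n).foldl (aBody1 c i) p) p) ∧
      ∀ a b, a < n → b < n →
        aget ((List.range m).foldl (fun p i => (List.range n).foldl (aBody1 c i) p) p) a b =
          if a = b then none else if a < m then some (pvW c a b) else some 0 := by
  intro m
  induction m with
  | zero =>
    intro _
    simp only [List.range_zero, List.foldl_nil]
    refine ⟨hS, ?_⟩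
    intro a b ha hb
    rw [hv a b ha hb]
    split_ifs <;> first | rfl | omega
  | succ k ihm =>
    intro hk
    obtain ⟨ihS, ihv⟩ := ihm (by omega)
    rw [List.range_succ, List.foldl_append, List.foldl_cons, List.foldl_nil]
    have hvk : ∀ a b, a < n → b < n →
        aget ((List.range k).foldl (fun p i => (List.range n).foldl (aBody1 c i) p) p) a b =
          if a = b then none else if a < k then some (pvW c a b) else some 0 := ihv
    obtain ⟨hS', hv'⟩ := phase1_inner c k (by omega) ihS hvk n le_rfl
    refine ⟨hS', ?_⟩
    intro a b ha hb
    rw [hv' a b ha hb]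
    split_ifs <;> first | rfl | omega

-- Phase 2 of A: one inner k-loop updates row j.
lemma phase2_inner {n : Nat} (i j : Nat) (hij : i ≠ j) (hi : i < n) (hj : j < n)
    (g : Nat → Nat → Int) {p : List (List (Option Int))} (hS : pvShape n p)
    (hrowj : ∀ b, b < n → aget p j b = if j = b then none else some (g j b))
    (hrowi : ∀ b, b < n → aget p i b = if i = b then none else some (g i b)) :
    ∀ m, m ≤ n → pvShape n ((List.range m).foldl (aBody2k i j) p) ∧
      (∀ b, b < n → aget ((List.range m).foldl (aBody2k i j) p) j b =
        if j = b then none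
        else if b < m ∧ b ≠ i then some (max (g j b) (min (g j i) (g i b)))
        else some (g j b)) ∧
      (∀ a b, a < n → b < n → a ≠ j → aget ((List.range m).foldl (aBody2k i j) p) a b = aget p a b) := by
  intro m
  induction m with
  | zero =>
    intro _
    simp only [List.range_zero, List.foldl_nil]
    refine ⟨hS, ?_, fun a b _ _ _ => by trivial⟩
    intro b hb
    rw [hrowj b hb]
    split_ifs <;> first | rfl | omega
  | succ k ihm =>
    intro hk
    obtain ⟨ihS, ihrowj, ihother⟩ := ihm (by omega)
    rw [List.range_succ, List.foldl_append, List.foldl_cons, List.foldl_nil]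
    simp only [aBody2k]
    by_cases hg : i ≠ k ∧ j ≠ k
    · rw [if_pos hg]
      set q := (List.range k).foldl (aBody2k i j) p with hq
      have hvjk : aget q j k = some (g j k) := by
        rw [ihrowj k (by omega)]
        rw [if_neg (by omega)]
        rw [if_neg (by omega)]
      have hvji : aget q j i = some (g j i) := by
        rw [ihrowj i hi, if_neg (by omega), if_neg (by omega)]
      have hvik : aget q i k = some (g i k) := by
        rw [ihother i k hi (by omega) hij, hrowi k (by omega), if_neg (by omega)]
      rw [hvjk, hvji, hvik]
      have hval : pmax (some (g j k)) (pmin (some (g j i)) (some (g i k))) =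
          some (max (g j k) (min (g j i) (g i k))) := rfl
      rw [hval]
      refine ⟨aset_shape ihS j k _ hj, ?_, ?_⟩
      · intro b hb
        rw [aget_aset ihS hj (by omega) _ j b]
        by_cases hbk : b = k
        · rw [if_pos ⟨rfl, hbk⟩]
          subst hbk
          rw [if_neg (by omega), if_pos (by omega)]
        · rw [if_neg (by omega), ihrowj b hb]
          split_ifs <;> first | rfl | omega
      · intro a b ha hb haj
        rw [aget_aset ihS hj (by omega) _ a b, if_neg (by omega), ihother a b ha hb haj]
    · rw [if_neg hg]
      refine ⟨ihS, ?_, ihother⟩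
      intro b hb
      rw [ihrowj b hb]
      split_ifs <;> first | rfl | omega

lemma phase2_middle {n : Nat} (i : Nat) (hi : i < n)
    (g : Nat → Nat → Int) {p : List (List (Option Int))} (hS : pvShape n p)
    (hv : ∀ a b, a < n → b < n → aget p a b = if a = b then none else some (g a b)) :
    ∀ m, m ≤ n → pvShape n ((List.range m).foldl (aBody2j n i) p) ∧
      ∀ a b, a < n → b < n →
        aget ((List.range m).foldl (aBody2j n i) p) a b =
          if a = b then none
          else if a < m ∧ a ≠ i ∧ b ≠ i then some (max (g a b) (min (g a i) (g i b)))
          else some (g a b) := by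
  intro m
  induction m with
  | zero =>
    intro _
    simp only [List.range_zero, List.foldl_nil]
    refine ⟨hS, ?_⟩
    intro a b ha hb
    rw [hv a b ha hb]
    split_ifs <;> first | rfl | omega
  | succ k ihm =>
    intro hk
    obtain ⟨ihS, ihv⟩ := ihm (by omega)
    rw [List.range_succ, List.foldl_append, List.foldl_cons, List.foldl_nil]
    simp only [aBody2j]
    by_cases hik : i = k
    · rw [if_pos hik]
      refine ⟨ihS, ?_⟩
      intro a b ha hb
      rw [ihv a b ha hb]
      split_ifs <;> first | rfl | omega
    · rw [if_neg hik]
      set q := (List.range k).foldl (aBody2j n i) p with hq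
      have hrowj' : ∀ b, b < n → aget q k b = if k = b then none else some (g k b) := by
        intro b hb
        rw [ihv k b (by omega) hb]
        split_ifs <;> first | rfl | omega
      have hrowi' : ∀ b, b < n → aget q i b = if i = b then none else some (g i b) := by
        intro b hb
        rw [ihv i b hi hb]
        split_ifs <;> first | rfl | omega
      obtain ⟨hS', hrowk', hother'⟩ :=
        phase2_inner i k hik hi (by omega) g ihS hrowj' hrowi' n le_rfl
      refine ⟨hS', ?_⟩
      intro a b ha hb
      by_cases hak : a = k
      · subst hak
        rw [hrowk' b hb]
        split_ifs <;> first | rfl | omega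
      · rw [hother' a b ha hb hak, ihv a b ha hb]
        split_ifs <;> first | rfl | omega

lemma phase2 (c : List (List Int)) {n : Nat} {p : List (List (Option Int))}
    (hS : pvShape n p)
    (hv : ∀ a b, a < n → b < n → aget p a b = if a = b then none else some (pvW c a b)) :
    ∀ m, m ≤ n →
      pvShape n ((List.range m).foldl (fun p i => (List.range n).foldl (aBody2j n i) p) p) ∧
      ∀ a b, a < n → b < n →
        aget ((List.range m).foldl (fun p i => (List.range n).foldl (aBody2j n i) p) p) a b =
          if a = b then none else some (pvGFW c m a b) := by
  intro m
  induction m with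
  | zero =>
    intro _
    simp only [List.range_zero, List.foldl_nil]
    exact ⟨hS, hv⟩
  | succ k ihm =>
    intro hk
    obtain ⟨ihS, ihv⟩ := ihm (by omega)
    rw [List.range_succ, List.foldl_append, List.foldl_cons, List.foldl_nil]
    obtain ⟨hS', hv'⟩ := phase2_middle k (by omega) (pvGFW c k) ihS ihv n le_rfl
    refine ⟨hS', ?_⟩
    intro a b ha hb
    rw [hv' a b ha hb]
    simp only [pvGFW, pvG]
    split_ifs <;> first | rfl | omega

-- The guarded and unguarded recursions agree off the diagonal.
lemma gfw_offdiag (c : List (List Int)) : ∀ m a b, a ≠ b → pvGFW c m a b = pvFW c m a b := by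
  intro m
  induction m with
  | zero => intro a b _; rfl
  | succ mm ih =>
    intro a b hab
    simp only [pvGFW, pvFW, pvG]
    by_cases haI : a = mm
    · rw [if_neg (by tauto), ih a b hab]
      subst haI
      omega
    · by_cases hbI : b = mm
      · rw [if_neg (by tauto), ih a b hab]
        subst hbI
        omega
      · rw [if_pos ⟨haI, hbI, hab⟩, ih a b hab, ih a mm haI, ih mm b (fun h => hbI h.symm)]

lemma A_char (c : List (List Int)) :
    calculate_strongest_paths c =
      (List.range c.length).map (fun a => (List.range c.length).map (fun b =>
        if a = b then none else some (pvFW c c.length a b))) := by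
  obtain ⟨hbS, hbv⟩ := build_matrix_spec c.length
  obtain ⟨h1S, h1v⟩ := phase1 c hbS hbv c.length le_rfl
  have h1v' : ∀ a b, a < c.length → b < c.length →
      aget ((List.range c.length).foldl (fun p i => (List.range c.length).foldl (aBody1 c i) p)
        (build_matrix c.length)) a b = if a = b then none else some (pvW c a b) := by
    intro a b ha hb
    rw [h1v a b ha hb]
    split_ifs <;> rfl
  obtain ⟨h2S, h2v⟩ := phase2 c h1S h1v' c.length le_rfl
  unfold calculate_strongest_paths
  apply eq_map_range h2S
  intro a b ha hb
  rw [h2v a b ha hb]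
  by_cases hab : a = b
  · simp [hab]
  · simp only [if_neg hab]
    rw [gfw_offdiag c c.length a b hab]

-- B-side ---------------------------------------------------------------------

lemma foldl_max_ge_init (f : Nat → Int) (l : List Nat) (x : Int) :
    x ≤ l.foldl (fun acc t => max acc (f t)) x := by
  induction l generalizing x with
  | nil => simp
  | cons h t ih =>
    simp only [List.foldl_cons]
    exact le_trans (le_max_left _ _) (ih _)

lemma foldl_max_ge_mem (f : Nat → Int) {l : List Nat} {t : Nat} (ht : t ∈ l) (x : Int) :
    f t ≤ l.foldl (fun acc t => max acc (f t)) x := by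
  induction l generalizing x with
  | nil => simp at ht
  | cons h t ih =>
    simp only [List.foldl_cons]
    rcases List.mem_cons.1 ht with rfl | hmem
    · exact le_trans (le_max_right _ _) (foldl_max_ge_init f t _)
    · exact ih hmem _

lemma foldl_max_le (f : Nat → Int) (l : List Nat) {x X : Int} (hx : x ≤ X)
    (h : ∀ t ∈ l, f t ≤ X) : l.foldl (fun acc t => max acc (f t)) x ≤ X := by
  induction l generalizing x with
  | nil => simpa
  | cons hd t ih =>
    simp only [List.foldl_cons]
    exact ih (max_le hx (h _ (List.mem_cons_self))) (fun t ht => h t (List.mem_cons_of_mem _ ht))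

lemma bget_bRelax {n : Nat} (d : List (List Int)) {a b : Nat} (ha : a < n) (hb : b < n) :
    cget (bRelax d n) a b = bRelaxEntry d a b n := by
  unfold cget bRelax
  rw [PySem.List.getD_map_range _ _ _ _ ha, PySem.List.getD_map_range _ _ _ _ hb]

lemma relaxEntry_ge_self (d : List (List Int)) (a b n : Nat) :
    cget d a b ≤ bRelaxEntry d a b n := by
  exact foldl_max_ge_init _ _ _

lemma relaxEntry_ge_via (d : List (List Int)) (a b : Nat) {t n : Nat} (ht : t < n) :
    min (cget d a t) (cget d t b) ≤ bRelaxEntry d a b n := by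
  exact foldl_max_ge_mem _ (List.mem_range.2 ht) _

lemma relaxEntry_le (d : List (List Int)) (a b n : Nat) {X : Int}
    (h0 : cget d a b ≤ X) (h : ∀ t, t < n → min (cget d a t) (cget d t b) ≤ X) :
    bRelaxEntry d a b n ≤ X := by
  exact foldl_max_le _ _ h0 (fun t ht => h t (List.mem_range.1 ht))

-- order facts about the Floyd-Warshall recursion
lemma fw_mono (c : List (List Int)) {m m' : Nat} (h : m ≤ m') (a b : Nat) :
    pvFW c m a b ≤ pvFW c m' a b := by
  induction m' with
  | zero =>
    have hm : m = 0 := Nat.le_zero.mp h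
    rw [hm]
  | succ k ih =>
    rcases Nat.lt_or_ge m (k+1) with hlt | hge
    · have := ih (by omega)
      simp only [pvFW]
      omega
    · have : m = k + 1 := by omega
      subst this; rfl

lemma fw_clos (c : List (List Int)) : ∀ m i, i < m → ∀ a b,
    min (pvFW c m a i) (pvFW c m i b) ≤ pvFW c m a b := by
  intro m
  induction m with
  | zero => omega
  | succ k ih =>
    intro i hi a b
    simp only [pvFW]
    rcases Nat.lt_or_ge i k with hlt | hge
    · have h1 := ih i hlt a b
      have h2 := ih i hlt a k
      have h3 := ih i hlt k b
      omega
    · have : i = k := by omega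
      subst this
      omega

-- iteration model of B's loop without the early exit
def pvIter (n : Nat) : Nat → List (List Int) → List (List Int)
  | 0, d => d
  | m + 1, d => pvIter n m (bRelax d n)

lemma pvIter_succ_comm (n m : Nat) (d : List (List Int)) :
    pvIter n m (bRelax d n) = bRelax (pvIter n m d) n := by
  induction m generalizing d with
  | zero => rfl
  | succ k ih =>
    simp only [pvIter]
    exact ih _

lemma bLoop_char (n : Nat) : ∀ m d, bRelax (bLoop n m d) n = bLoop n m d ∨ bLoop n m d = pvIter n m d := by
  intro m
  induction m with
  | zero => intro d; right; rfl
  | succ k ih =>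
    intro d
    simp only [bLoop]
    by_cases h : bRelax d n = d
    · rw [if_pos h]
      left; exact h
    · rw [if_neg h]
      rcases ih (bRelax d n) with hl | hr
      · left; exact hl
      · right; exact hr

lemma bRelax_le (n : Nat) (F : Nat → Nat → Int)
    (hcl : ∀ i, i < n → ∀ a b, a < n → b < n → min (F a i) (F i b) ≤ F a b)
    {d : List (List Int)} (h : ∀ a b, a < n → b < n → cget d a b ≤ F a b) :
    ∀ a b, a < n → b < n → cget (bRelax d n) a b ≤ F a b := by
  intro a b ha hb
  rw [bget_bRelax d ha hb]
  apply relaxEntry_le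
  · exact h a b ha hb
  · intro t ht
    calc min (cget d a t) (cget d t b) ≤ min (F a t) (F t b) := by
          have := h a t ha ht; have := h t b ht hb; omega
      _ ≤ F a b := hcl t ht a b ha hb

lemma bLoop_le (n : Nat) (F : Nat → Nat → Int)
    (hcl : ∀ i, i < n → ∀ a b, a < n → b < n → min (F a i) (F i b) ≤ F a b) :
    ∀ m d, (∀ a b, a < n → b < n → cget d a b ≤ F a b) →
      ∀ a b, a < n → b < n → cget (bLoop n m d) a b ≤ F a b := by
  intro m
  induction m with
  | zero => intro d h; exact h
  | succ k ih =>
    intro d h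
    simp only [bLoop]
    by_cases hst : bRelax d n = d
    · simpa [hst] using h
    · rw [if_neg hst]
      exact ih _ (bRelax_le n F hcl h)

lemma bget_le_bRelax (n : Nat) (d : List (List Int)) {a b : Nat} (ha : a < n) (hb : b < n) :
    cget d a b ≤ cget (bRelax d n) a b := by
  rw [bget_bRelax d ha hb]
  exact relaxEntry_ge_self d a b n

lemma bLoop_ge_init (n : Nat) : ∀ m d, ∀ a b, a < n → b < n →
    cget d a b ≤ cget (bLoop n m d) a b := by
  intro m
  induction m with
  | zero => intro d a b ha hb; exact le_refl _
  | succ k ih =>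
    intro d a b ha hb
    simp only [bLoop]
    by_cases hst : bRelax d n = d
    · simp [hst]
    · rw [if_neg hst]
      exact le_trans (bget_le_bRelax n d ha hb) (ih _ a b ha hb)

lemma iter_ge_fw (c : List (List Int)) (n : Nat) {d0 : List (List Int)}
    (h0 : ∀ a b, a < n → b < n → cget d0 a b = pvW c a b) :
    ∀ m, m ≤ n → ∀ a b, a < n → b < n → pvFW c m a b ≤ cget (pvIter n m d0) a b := by
  intro m
  induction m with
  | zero =>
    intro _ a b ha hb
    simp only [pvFW, pvIter]
    rw [h0 a b ha hb]
  | succ k ih =>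
    intro hk a b ha hb
    simp only [pvFW, pvIter, pvIter_succ_comm]
    rw [bget_bRelax _ ha hb]
    have h1 := le_trans (ih (by omega) a b ha hb) (relaxEntry_ge_self (pvIter n k d0) a b n)
    have h2 : min (pvFW c k a k) (pvFW c k k b) ≤ bRelaxEntry (pvIter n k d0) a b n := by
      have ha' := ih (by omega) a k ha (by omega)
      have hb' := ih (by omega) k b (by omega) hb
      calc min (pvFW c k a k) (pvFW c k k b)
          ≤ min (cget (pvIter n k d0) a k) (cget (pvIter n k d0) k b) := by omega
        _ ≤ bRelaxEntry (pvIter n k d0) a b n := relaxEntry_ge_via _ a b (by omega)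
    omega

lemma stable_ge_fw (c : List (List Int)) (n : Nat) {G : List (List Int)}
    (hst : bRelax G n = G) (hw : ∀ a b, a < n → b < n → pvW c a b ≤ cget G a b) :
    ∀ m, m ≤ n → ∀ a b, a < n → b < n → pvFW c m a b ≤ cget G a b := by
  have hcl : ∀ t, t < n → ∀ a b, a < n → b < n →
      min (cget G a t) (cget G t b) ≤ cget G a b := by
    intro t ht a b ha hb
    conv_rhs => rw [← hst]
    rw [bget_bRelax _ ha hb]
    exact relaxEntry_ge_via _ a b ht
  intro m
  induction m with
  | zero => intro _ a b ha hb; exact hw a b ha hb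
  | succ k ih =>
    intro hk a b ha hb
    have h1 := ih (by omega) a b ha hb
    have h2 := ih (by omega) a k ha (by omega)
    have h3 := ih (by omega) k b (by omega) hb
    have h4 := hcl k (by omega) a b ha hb
    simp only [pvFW]
    omega

lemma B_char (c : List (List Int)) :
    calculate_strongest_paths_alt c =
      (List.range c.length).map (fun a => (List.range c.length).map (fun b =>
        if a = b then none else some (pvFW c c.length a b))) := by
  have h0 : ∀ a b, a < c.length → b < c.length →
      cget ((List.range c.length).map (fun a => (List.range c.length).map (fun b =>
        if cget c a b > cget c b a then cget c a b else 0))) a b = pvW c a b := by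
    intro a b ha hb
    unfold cget
    rw [PySem.List.getD_map_range _ _ _ _ ha, PySem.List.getD_map_range _ _ _ _ hb]
    rfl
  set n := c.length with hn
  set d0 := (List.range n).map (fun a => (List.range n).map (fun b =>
      if cget c a b > cget c b a then cget c a b else 0)) with hd0
  have hup : ∀ a b, a < n → b < n → cget (bLoop n n d0) a b ≤ pvFW c n a b := by
    apply bLoop_le n (pvFW c n) (fun i hi a b _ _ => fw_clos c n i hi a b)
    intro a b ha hb
    rw [h0 a b ha hb]
    exact fw_mono c (Nat.zero_le n) a b
  have hlo : ∀ a b, a < n → b < n → pvFW c n a b ≤ cget (bLoop n n d0) a b := by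
    rcases bLoop_char n n d0 with hst | hit
    · apply stable_ge_fw c n hst ?_ n le_rfl
      intro a b ha hb
      rw [← h0 a b ha hb]
      exact bLoop_ge_init n n d0 a b ha hb
    · intro a b ha hb
      rw [hit]
      exact iter_ge_fw c n h0 n le_rfl a b ha hb
  have heq : ∀ a b, a < n → b < n → cget (bLoop n n d0) a b = pvFW c n a b := by
    intro a b ha hb
    exact le_antisymm (hup a b ha hb) (hlo a b ha hb)
  unfold calculate_strongest_paths_alt
  apply List.map_congr_left
  intro a hma
  apply List.map_congr_left
  intro b hmb
  have ha := List.mem_range.1 hma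
  have hb := List.mem_range.1 hmb
  by_cases hab : a = b
  · simp [hab]
  · simp only [if_neg hab]
    rw [heq a b ha hb]

-- ===== VERDICT (by name: the statement is the Claim_ definition above) =====
theorem calculate_strongest_paths_spec : Claim_equal_calculate_strongest_paths := by
  intro count _ _
  unfold Spec_calculate_strongest_paths
  rw [A_char, B_char]
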